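-- pv_equiv track=rewrite | github.com/vishalpmittal/practice-fun | funNLearn/src/main/java/dsAlgo/leetcode/P10xx/P1040._MovingStonesUntilConsecutiveII.py | numMovesStonesII
-- ===== SOURCE A (Python) =====
-- from typing import List
--
-- def numMovesStonesII(S: List[int]) -> List[int]:
--     """
--         use a sliding window to find out the gaps
--
--     """
--     S.sort()
--     i, n, low = 0, len(S), len(S)
--     high = max(S[-1] - n + 2 - S[1], S[-2] - S[0] - n + 2)
--     for j in range(n):
--         while S[j] - S[i] >= n:
--             i += 1
--         if j - i + 1 == n - 1 and S[j] - S[i] == n - 2: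
--             low = min(low, 2)
--         else:
--             low = min(low, n - (j - i + 1))
--     return [low, high]
-- ===== SOURCE B (Python) =====
-- from typing import List
--
-- def numMovesStonesII(S: List[int]) -> List[int]:
--     # Same result as the sliding-window original (also sorts S in place), but the
--     # minimum is computed per endpoint j with an independent binary search for the
--     # window start, instead of a left pointer carried across iterations of j.
--     S.sort()
--     n = len(S)
--     high = max(S[-1] - n + 2 - S[1], S[-2] - S[0] - n + 2)
--
--     def moves(j):
--         # leftmost index whose stone lies in the window (S[j]-n, S[j]]
--         lo, hi = 0, n
--         while lo < hi:
--             mid = (lo + hi) // 2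
--             if S[mid] < S[j] - n + 1:
--                 lo = mid + 1
--             else:
--                 hi = mid
--         cnt = j - lo + 1
--         if cnt == n - 1 and S[j] - S[lo] == n - 2:
--             return 2
--         return n - cnt
--
--     low = n
--     for j in range(n):
--         low = min(low, moves(j))
--     return [low, high]
-- ===== Notes on version B (the rewrite author's own statement) =====
-- stated objective: alternative
-- what changed: The minimum is computed by an independent binary search per window endpoint j (leftmost stone index with S[i] > S[j]-n) instead of A's left pointer carried across the outer loop; sort and the closed-form maximum are kept.
import Mathlib
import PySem

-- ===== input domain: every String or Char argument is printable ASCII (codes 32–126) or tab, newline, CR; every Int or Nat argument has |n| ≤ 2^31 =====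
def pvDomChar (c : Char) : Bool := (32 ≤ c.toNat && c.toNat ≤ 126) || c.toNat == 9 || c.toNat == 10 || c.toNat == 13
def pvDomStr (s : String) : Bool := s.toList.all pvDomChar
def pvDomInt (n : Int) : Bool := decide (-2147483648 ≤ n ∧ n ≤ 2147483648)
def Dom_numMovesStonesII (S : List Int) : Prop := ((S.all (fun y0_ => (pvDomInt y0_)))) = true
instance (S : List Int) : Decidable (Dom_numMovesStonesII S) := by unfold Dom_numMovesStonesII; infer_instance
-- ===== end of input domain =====

-- B replaces A's left pointer carried across the outer loop by an independent
-- binary search per endpoint j (same cost class; objective: alternative).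
-- Both Pythons sort S in place; the equivalence proved here is about the return value.

-- ===== PORT A =====
-- the inner `while S[j] - S[i] >= n: i += 1` loop (fuel = len(S) suffices; i never passes j)
def pvWhileA (T : List Int) (n sj : Int) : Nat → Int → Int
  | 0, i => i
  | fuel + 1, i =>
    if sj - PySem.List.pyGetD T i 0 ≥ n then pvWhileA T n sj fuel (i + 1) else i

def numMovesStonesII (S : List Int) : List Int :=
  let T := PySem.List.sorted S (fun x => x) false
  let n : Int := T.length
  match PySem.List.pyGet? T (-1), PySem.List.pyGet? T 1, PySem.List.pyGet? T (-2), PySem.List.pyGet? T 0 with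
  | some sm1, some s1, some sm2, some s0 =>
    let high := max (sm1 - n + 2 - s1) (sm2 - s0 - n + 2)
    let r := (PySem.List.pyRange 0 n 1).foldl (fun (st : Int × Int) j =>
        let i := pvWhileA T n (PySem.List.pyGetD T j 0) T.length st.1
        if j - i + 1 = n - 1 ∧ PySem.List.pyGetD T j 0 - PySem.List.pyGetD T i 0 = n - 2 then
          (i, min st.2 2)
        else
          (i, min st.2 (n - (j - i + 1)))) (0, n)
    [r.2, high]
  | _, _, _, _ => []   -- n < 2: Python raises IndexError on S[1] / S[-1] / S[-2]

-- ===== PORT B =====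
-- Source B's hand-written binary search (`while lo < hi: …`), fuel = len(S) suffices
def pvBisect (T : List Int) (x : Int) : Nat → Int → Int → Int
  | 0, lo, _ => lo
  | fuel + 1, lo, hi =>
    if lo < hi then
      let mid := PySem.Int.floordiv (lo + hi) 2
      if PySem.List.pyGetD T mid 0 < x then pvBisect T x fuel (mid + 1) hi
      else pvBisect T x fuel lo mid
    else lo

-- Source B's helper moves(j)
def pvMoves (T : List Int) (n j : Int) : Int :=
  let sj := PySem.List.pyGetD T j 0
  let lo := pvBisect T (sj - n + 1) T.length 0 n
  let cnt := j - lo + 1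
  if cnt = n - 1 ∧ sj - PySem.List.pyGetD T lo 0 = n - 2 then 2 else n - cnt

def numMovesStonesII_alt (S : List Int) : List Int :=
  let T := PySem.List.sorted S (fun x => x) false
  let n : Int := T.length
  match PySem.List.pyGet? T (-1) with
  | none => []   -- n < 2: Python raises IndexError on S[1] / S[-1] / S[-2]
  | some sm1 =>
    match PySem.List.pyGet? T 1 with
    | none => []
    | some s1 =>
      match PySem.List.pyGet? T (-2) with
      | none => []
      | some sm2 =>
        match PySem.List.pyGet? T 0 with
        | none => []
        | some s0 =>
          let high := max (sm1 - n + 2 - s1) (sm2 - s0 - n + 2)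
          let low := (PySem.List.pyRange 0 n 1).foldl (fun acc j => min acc (pvMoves T n j)) n
          [low, high]

-- ===== PRECONDITION & SPEC =====
-- Pre_: both Pythons raise IndexError (S[1] / S[-1] / S[-2]) when len(S) < 2; they return on every longer list.
def Pre_numMovesStonesII (S : List Int) : Prop := 2 ≤ S.length
instance (S : List Int) : Decidable (Pre_numMovesStonesII S) := by unfold Pre_numMovesStonesII; infer_instance
def pvWitness_numMovesStonesII : List Int := [7, 4, 9]

def Spec_numMovesStonesII (S : List Int) (out : List Int) : Prop := out = numMovesStonesII_alt S
instance (S : List Int) (out : List Int) : Decidable (Spec_numMovesStonesII S out) := by unfold Spec_numMovesStonesII; infer_instance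

-- ===== CLAIM (what is proved, stated in full; the proofs are below) =====
def Claim_equal_numMovesStonesII : Prop := ∀ (S : List Int), Dom_numMovesStonesII S → Pre_numMovesStonesII S → Spec_numMovesStonesII S (numMovesStonesII S)

-- ===== LEMMAS AND PROOFS =====

-- count of stones strictly below the window start for endpoint index j
def pvCnt (T : List Int) (n j : Int) : Nat :=
  T.countP (fun v => decide (v < PySem.List.pyGetD T j 0 - n + 1))

-- in a sorted list, the k-th element is < x exactly when k is below the count of elements < x
lemma pv_char (x : Int) : ∀ (T : List Int), T.Pairwise (fun a b : Int => a ≤ b) →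
    ∀ k, (hk : k < T.length) → (T[k] < x ↔ k < T.countP (fun v => decide (v < x))) := by
  intro T hT
  induction T with
  | nil => intro k hk; simp at hk
  | cons t ts ih =>
    rcases List.pairwise_cons.mp hT with ⟨hhead, htail⟩
    intro k hk
    by_cases ht : t < x
    · have : (t :: ts).countP (fun v => decide (v < x)) = ts.countP (fun v => decide (v < x)) + 1 := by
        simp [ht]
      rw [this]
      cases k with
      | zero => simpa using ht
      | succ k =>
        simp only [List.getElem_cons_succ]
        rw [ih htail k (by simpa using hk)]
        omega
    · have hz : ts.countP (fun v => decide (v < x)) = 0 := by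
        rw [List.countP_eq_zero]
        intro a ha
        have := hhead a ha
        simp only [decide_eq_true_eq]
        omega
      have : (t :: ts).countP (fun v => decide (v < x)) = 0 := by
        simp [ht, hz]
      rw [this]
      constructor
      · intro h
        exfalso
        have hmem := List.getElem_mem hk
        have hty : t ≤ (t :: ts)[k] := by
          rcases List.mem_cons.mp hmem with he | hm
          · omega
          · exact hhead _ hm
        omega
      · omega

lemma pv_whileA_eq (T : List Int) (hT : T.Pairwise (fun a b : Int => a ≤ b)) (n sj : Int)
    (c : Nat) (hc : c = T.countP (fun v => decide (v < sj - n + 1))) (hclen : (c : Int) < T.length) :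
    ∀ fuel (i : Int), 0 ≤ i → i ≤ (c : Int) → ((c : Int) - i).toNat ≤ fuel →
      pvWhileA T n sj fuel i = c := by
  intro fuel
  induction fuel with
  | zero => intro i h0 hic hf; simp [pvWhileA]; omega
  | succ fuel ih =>
    intro i h0 hic hf
    have hilen : i < (T.length : Int) := lt_of_le_of_lt hic hclen
    have hget := PySem.List.pyGetD_eq_getElem T (0 : Int) h0 hilen
    have hchar := pv_char (sj - n + 1) T hT i.toNat (by omega)
    rw [← hc] at hchar
    simp only [pvWhileA]
    by_cases hcond : sj - PySem.List.pyGetD T i 0 ≥ n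
    · have hlt : T[i.toNat]'(by omega) < sj - n + 1 := by rw [hget] at hcond; omega
      have : i.toNat < c := hchar.mp hlt
      rw [if_pos hcond]
      exact ih (i + 1) (by omega) (by omega) (by omega)
    · have : ¬ T[i.toNat]'(by omega) < sj - n + 1 := by rw [hget] at hcond; omega
      have hci : c ≤ i.toNat := by
        by_contra hcc
        exact this (hchar.mpr (by omega))
      rw [if_neg hcond]
      omega

lemma pv_bisect_eq (T : List Int) (hT : T.Pairwise (fun a b : Int => a ≤ b)) (x : Int)
    (c : Nat) (hc : c = T.countP (fun v => decide (v < x))) :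
    ∀ fuel (lo hi : Int), 0 ≤ lo → lo ≤ (c : Int) → (c : Int) ≤ hi → hi ≤ T.length →
      (hi - lo).toNat ≤ fuel → pvBisect T x fuel lo hi = c := by
  intro fuel
  induction fuel with
  | zero => intro lo hi h0 hlc hch hhl hf; simp [pvBisect]; omega
  | succ fuel ih =>
    intro lo hi h0 hlc hch hhl hf
    simp only [pvBisect]
    by_cases hlh : lo < hi
    · rw [if_pos hlh]
      have hmid1 : lo ≤ PySem.Int.floordiv (lo + hi) 2 := by
        rw [PySem.Int.le_floordiv_iff_mul_le (by omega)]; omega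
      have hmid2 : PySem.Int.floordiv (lo + hi) 2 < hi := by
        rw [PySem.Int.floordiv_lt_iff_lt_mul (by omega)]; omega
      set mid := PySem.Int.floordiv (lo + hi) 2 with hmiddef
      have hget := PySem.List.pyGetD_eq_getElem T (0 : Int) (show (0:Int) ≤ mid by omega) (show mid < (T.length : Int) by omega)
      have hchar := pv_char x T hT mid.toNat (by omega)
      rw [← hc] at hchar
      by_cases hcond : PySem.List.pyGetD T mid 0 < x
      · have : mid.toNat < c := hchar.mp (by rw [hget] at hcond; exact hcond)
        rw [if_pos hcond]
        exact ih (mid + 1) hi (by omega) (by omega) hch hhl (by omega)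
      · have : c ≤ mid.toNat := by
          by_contra hcc
          exact hcond (by rw [hget]; exact hchar.mpr (by omega))
        rw [if_neg hcond]
        exact ih lo mid h0 hlc (by omega) (by omega) (by omega)
    · rw [if_neg hlh]; omega

-- the window-start count never exceeds its endpoint, and is monotone in the endpoint
lemma pv_cnt_le (T : List Int) (hT : T.Pairwise (fun a b : Int => a ≤ b)) (n j : Int)
    (h0 : 0 ≤ j) (hj : j < T.length) (hn : 1 ≤ n) : (pvCnt T n j : Int) ≤ j := by
  have hget := PySem.List.pyGetD_eq_getElem T (0 : Int) h0 hj
  have hchar := pv_char (PySem.List.pyGetD T j 0 - n + 1) T hT j.toNat (by omega)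
  have hnot : ¬ T[j.toNat]'(by omega) < PySem.List.pyGetD T j 0 - n + 1 := by
    rw [hget]; omega
  have : pvCnt T n j ≤ j.toNat := by
    by_contra hcc
    exact hnot (hchar.mpr (by unfold pvCnt at hcc; omega))
  omega

lemma pv_cnt_mono (T : List Int) (hT : T.Pairwise (fun a b : Int => a ≤ b)) (n j j' : Int)
    (h0 : 0 ≤ j) (hjj : j ≤ j') (hj' : j' < T.length) :
    pvCnt T n j ≤ pvCnt T n j' := by
  have hg := PySem.List.pyGetD_eq_getElem T (0 : Int) h0 (show j < (T.length : Int) by omega)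
  have hg' := PySem.List.pyGetD_eq_getElem T (0 : Int) (show (0:Int) ≤ j' by omega) hj'
  have hmono : T[j.toNat]'(by omega) ≤ T[j'.toNat]'(by omega) := by
    rcases lt_or_eq_of_le (show j.toNat ≤ j'.toNat by omega) with h | h
    · exact List.pairwise_iff_getElem.mp hT j.toNat j'.toNat (by omega) (by omega) h
    · exact le_of_eq (getElem_congr_idx h)
  unfold pvCnt
  apply List.countP_mono_left
  intro a _ ha
  simp only [decide_eq_true_eq] at *
  rw [hg] at ha; rw [hg']
  omega

-- the main loop invariant: A's fold with carried pointer i equals B's fold of per-j moves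
lemma pv_fold_eq (T : List Int) (hT : T.Pairwise (fun a b : Int => a ≤ b)) (n : Int)
    (hn : n = (T.length : Int)) :
    ∀ (d : Nat) (a : Int), (n - a).toNat = d → 0 ≤ a →
      ∀ (i low : Int), 0 ≤ i → (a < n → i ≤ (pvCnt T n a : Int)) →
      ((PySem.List.pyRange a n 1).foldl (fun (st : Int × Int) j =>
          let i := pvWhileA T n (PySem.List.pyGetD T j 0) T.length st.1
          if j - i + 1 = n - 1 ∧ PySem.List.pyGetD T j 0 - PySem.List.pyGetD T i 0 = n - 2 then
            (i, min st.2 2)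
          else
            (i, min st.2 (n - (j - i + 1)))) (i, low)).2
      = (PySem.List.pyRange a n 1).foldl (fun acc j => min acc (pvMoves T n j)) low := by
  intro d
  induction d with
  | zero =>
    intro a hd h0 i low hi0 hic
    rw [PySem.List.pyRange_one_eq_nil (by omega)]
    simp
  | succ d ih =>
    intro a hd h0 i low hi0 hic
    have han : a < n := by omega
    have hn1 : 1 ≤ n := by omega
    rw [PySem.List.pyRange_one_cons han, List.foldl_cons, List.foldl_cons]
    have hcle : (pvCnt T n a : Int) ≤ a := pv_cnt_le T hT n a h0 (by omega) hn1
    have hclen : (pvCnt T n a : Int) < T.length := by omega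
    have hwa : pvWhileA T n (PySem.List.pyGetD T a 0) T.length i = pvCnt T n a := by
      apply pv_whileA_eq T hT n (PySem.List.pyGetD T a 0) (pvCnt T n a) rfl hclen
      · exact hi0
      · exact hic han
      · omega
    have hbi : pvBisect T (PySem.List.pyGetD T a 0 - n + 1) T.length 0 n = pvCnt T n a := by
      apply pv_bisect_eq T hT _ (pvCnt T n a) rfl
      · omega
      · simp
      · omega
      · omega
      · omega
    have hstep : (let i_1 := pvWhileA T n (PySem.List.pyGetD T a 0) T.length (i, low).1;
        if a - i_1 + 1 = n - 1 ∧ PySem.List.pyGetD T a 0 - PySem.List.pyGetD T i_1 0 = n - 2 then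
          (i_1, min (i, low).2 2)
        else (i_1, min (i, low).2 (n - (a - i_1 + 1))))
        = ((pvCnt T n a : Int), min low (pvMoves T n a)) := by
      show (if a - pvWhileA T n (PySem.List.pyGetD T a 0) T.length i + 1 = n - 1 ∧
          PySem.List.pyGetD T a 0 - PySem.List.pyGetD T (pvWhileA T n (PySem.List.pyGetD T a 0) T.length i) 0 = n - 2 then
          ((pvWhileA T n (PySem.List.pyGetD T a 0) T.length i), min low 2)
        else ((pvWhileA T n (PySem.List.pyGetD T a 0) T.length i),
          min low (n - (a - (pvWhileA T n (PySem.List.pyGetD T a 0) T.length i) + 1))))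
        = ((pvCnt T n a : Int), min low (pvMoves T n a))
      rw [hwa]
      simp only [pvMoves, hbi]
      split_ifs with h <;> rfl
    rw [hstep]
    exact ih (a + 1) (by omega) (by omega) (pvCnt T n a : Int) (min low (pvMoves T n a))
      (by omega)
      (fun h => by exact_mod_cast Nat.cast_le.mpr (pv_cnt_mono T hT n a (a + 1) h0 (by omega) (by omega)))

-- ===== VERDICT (by name: the statement is the Claim_ definition above) =====
theorem numMovesStonesII_spec : Claim_equal_numMovesStonesII := by
  intro S _ _
  unfold Spec_numMovesStonesII numMovesStonesII numMovesStonesII_alt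
  have hT : (PySem.List.sorted S (fun x => x) false).Pairwise (fun a b : Int => a ≤ b) :=
    PySem.List.sorted_pairwise S (fun x => x)
  set T := PySem.List.sorted S (fun x => x) false with hTdef
  cases h1 : PySem.List.pyGet? T (-1) with
  | none => simp only [h1]
  | some sm1 =>
    cases h2 : PySem.List.pyGet? T 1 with
    | none => simp only [h1, h2]
    | some s1 =>
      cases h3 : PySem.List.pyGet? T (-2) with
      | none => simp only [h1, h2, h3]
      | some sm2 =>
        cases h4 : PySem.List.pyGet? T 0 with
        | none => simp only [h1, h2, h3, h4]
        | some s0 =>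
          simp only [h1, h2, h3, h4, List.cons.injEq, and_true]
          exact pv_fold_eq T hT (T.length : Int) rfl ((T.length : Int) - 0).toNat 0 rfl
            (by omega) 0 (T.length : Int) (by omega) (fun _ => by positivity)
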